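-- pv_equiv track=rewrite | github.com/modimore/project-euler-to-100 | solutions/python/P82.py | minimum_path_sum_3ways
-- ===== SOURCE A (Python) =====
-- def minimum_path_sum_3ways(grid):
--     w, h = len(grid[0]), len(grid)
--     sum_grid = [[0]*w for _ in range(h)]
--     for j in range(0, h):
--         sum_grid[j][0] = grid[j][0]
--     for i in range(1, w):
--         for j1 in range(0, h):
--             dists = []
--             for j2 in range(0, j1):
--                 dists.append(sum_grid[j2][i-1] + sum(grid[j][i] for j in range(j2, j1+1)))
--                 dists.append(sum_grid[j2][i-1] + sum(grid[j][i-1] for j in range(j2+1, j1+1)) + grid[j1][i])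
--             dists.append(sum_grid[j1][i-1] + grid[j1][i])
--             for j2 in range(j1+1, h):
--                 dists.append(sum_grid[j2][i-1] + sum(grid[j][i] for j in range(j1, j2+1)))
--                 dists.append(sum_grid[j2][i-1] + sum(grid[j][i-1] for j in range(j1, j2)) + grid[j1][i])
--             sum_grid[j1][i] = min(dists)
--     return min(sum_grid[j][-1] for j in range(0, h))
-- ===== SOURCE B (Python) =====
-- def minimum_path_sum_3ways(grid):
--     h, w = len(grid), len(grid[0])
--     prev = [row[0] for row in grid]
--     for i in range(1, w):
--         cg = [row[i] for row in grid]
--         cp = [row[i - 1] for row in grid]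
--         # D[j]: best cost arriving at row j coming from above within column i
--         D = [prev[0] + cg[0]]
--         for j in range(1, h):
--             D.append(min(prev[j], D[-1]) + cg[j])
--         # E[j]: best cost of walking down column i-1 ending just above the right-step into row j
--         E = [None]
--         for j in range(1, h):
--             E.append((prev[j - 1] if E[-1] is None else min(E[-1], prev[j - 1])) + cp[j])
--         # U[j]: best cost arriving at row j coming from below within column i
--         U = [None] * h
--         U[h - 1] = prev[h - 1] + cg[h - 1]
--         for j in range(h - 2, -1, -1):
--             U[j] = min(prev[j], U[j + 1]) + cg[j]
--         # F[j]: best cost of walking up column i-1 ending just below the right-step into row j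
--         F = [None] * h
--         if h >= 2:
--             F[h - 2] = prev[h - 1] + cp[h - 2]
--         for j in range(h - 3, -1, -1):
--             F[j] = min(prev[j + 1], F[j + 1]) + cp[j]
--         cur = []
--         for j in range(h):
--             v = min(D[j], U[j])
--             if j > 0:
--                 v = min(v, E[j] + cg[j])
--             if j < h - 1:
--                 v = min(v, F[j] + cg[j])
--             cur.append(v)
--         prev = cur
--     return min(prev)
-- ===== Notes on version B (the rewrite author's own statement) =====
-- stated objective: faster
-- what changed: Replaces the per-cell enumeration of all O(h) candidate rows with their O(h)-long segment sums by four O(h) prefix/suffix-minimum relaxation sweeps per column (down/up in the current column, down/up in the previous column), keeping only a 1-D previous-column array.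
import Mathlib
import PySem

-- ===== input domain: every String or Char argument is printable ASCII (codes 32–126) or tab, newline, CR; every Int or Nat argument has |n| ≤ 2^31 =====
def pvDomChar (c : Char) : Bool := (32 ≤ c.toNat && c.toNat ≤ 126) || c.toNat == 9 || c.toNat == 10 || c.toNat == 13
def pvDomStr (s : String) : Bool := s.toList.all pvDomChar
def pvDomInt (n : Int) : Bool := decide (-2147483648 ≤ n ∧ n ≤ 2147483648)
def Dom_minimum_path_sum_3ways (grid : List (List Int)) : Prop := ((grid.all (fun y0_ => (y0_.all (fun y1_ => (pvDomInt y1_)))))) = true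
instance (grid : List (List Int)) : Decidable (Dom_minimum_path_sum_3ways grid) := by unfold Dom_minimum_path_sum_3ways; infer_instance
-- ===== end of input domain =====

-- B replaces A's per-cell enumeration of every start row with its O(h)-long segment sum
-- (O(w*h^3)) by four prefix/suffix-minimum relaxation sweeps per column over a 1-D array
-- (O(w*h)); measured faster. A mutates only its local sum_grid, so return values are compared.

-- ===== PORT A =====
-- sum_grid[j][i] read / write (out of range = IndexError in Python, excluded by Pre_)
def pvGet2 (m : List (List Int)) (j i : Nat) : Int := (m.getD j []).getD i 0

def pvSet2 (m : List (List Int)) (j i : Nat) (v : Int) : List (List Int) :=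
  m.set j ((m.getD j []).set i v)

-- sum(f(j) for j in range(a, b+1)) — the inline generator sums of A
def pvSeg (f : Nat → Int) (a b : Nat) : Int :=
  (List.range' a (b + 1 - a)).foldl (fun s j => s + f j) 0

-- the `dists` list A builds for row j1 of a column: p = previous column of sum_grid,
-- gc = current grid column, qc = previous grid column
def pvDists (p gc qc : Nat → Int) (h j1 : Nat) : List Int :=
  ((List.range j1).foldl (fun acc j2 =>
      acc ++ [p j2 + pvSeg gc j2 j1, p j2 + pvSeg qc (j2 + 1) j1 + gc j1]) [])
  ++ [p j1 + gc j1]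
  ++ ((List.range' (j1 + 1) (h - (j1 + 1))).foldl (fun acc j2 =>
      acc ++ [p j2 + pvSeg gc j1 j2, p j2 + pvSeg qc j1 (j2 - 1) + gc j1]) [])

def minimum_path_sum_3ways (grid : List (List Int)) : Int :=
  let w := (grid.getD 0 []).length
  let h := grid.length
  let sg0 : List (List Int) := (List.range h).map (fun _ => List.replicate w 0)
  let sg1 := (List.range h).foldl (fun m j => pvSet2 m j 0 (pvGet2 grid j 0)) sg0
  let sgF := (List.range' 1 (w - 1)).foldl (fun m i =>
      (List.range h).foldl (fun m2 j1 =>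
        pvSet2 m2 j1 i ((PySem.List.min? (pvDists (fun j2 => pvGet2 m2 j2 (i - 1))
            (fun j' => pvGet2 grid j' i) (fun j' => pvGet2 grid j' (i - 1)) h j1)
          (fun x => x)).getD 0)) m) sg1
  (PySem.List.min? ((List.range h).map (fun j => (PySem.List.pyGet? (sgF.getD j []) (-1)).getD 0))
    (fun x => x)).getD 0

-- ===== PORT B =====
-- Source B's four sweep recurrences, written as recursions on the row index:
-- D[j] = min(prev[j], D[j-1]) + cg[j]           (down-sweep in the current column)
def pvD (p g : Nat → Int) : Nat → Int
  | 0 => p 0 + g 0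
  | j + 1 => min (p (j + 1)) (pvD p g j) + g (j + 1)

-- E[k+1] = min(E[k], prev[k]) + cp[k+1], value stored shifted: pvE k = E[k+1]
def pvE (p q : Nat → Int) : Nat → Int
  | 0 => p 0 + q 1
  | k + 1 => min (pvE p q k) (p (k + 1)) + q (k + 2)

-- U[j] = min(prev[j], U[j+1]) + cg[j], from the bottom: pvU t k = U[t-k] (t = h-1)
def pvU (p g : Nat → Int) (t : Nat) : Nat → Int
  | 0 => p t + g t
  | k + 1 => min (p (t - (k + 1))) (pvU p g t k) + g (t - (k + 1))

-- F[j] = min(prev[j+1], F[j+1]) + cp[j], from the bottom: pvF t2 k = F[t2-k] (t2 = h-2)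
def pvF (p q : Nat → Int) (t2 : Nat) : Nat → Int
  | 0 => p (t2 + 1) + q t2
  | k + 1 => min (p (t2 - k)) (pvF p q t2 k) + q (t2 - (k + 1))

-- cur[j] = min of the sweep values that exist at row j (Source B's last per-column loop)
def pvRow (p gc qc : Nat → Int) (h j : Nat) : Int :=
  let v1 := min (pvD p gc j) (pvU p gc (h - 1) (h - 1 - j))
  let v2 := if 0 < j then min v1 (pvE p qc (j - 1) + gc j) else v1
  if j + 1 < h then min v2 (pvF p qc (h - 2) (h - 2 - j) + gc j) else v2

def pvCol (grid : List (List Int)) (prev : List Int) (i : Nat) : List Int :=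
  (List.range grid.length).map (fun j =>
    pvRow (fun j2 => prev.getD j2 0) (fun j' => pvGet2 grid j' i)
      (fun j' => pvGet2 grid j' (i - 1)) grid.length j)

def minimum_path_sum_3ways_alt (grid : List (List Int)) : Int :=
  let w := (grid.getD 0 []).length
  let prev0 := grid.map (fun row => row.getD 0 0)
  let last := (List.range' 1 (w - 1)).foldl (fun prev i => pvCol grid prev i) prev0
  (PySem.List.min? last (fun x => x)).getD 0

-- ===== PRECONDITION & SPEC =====
-- Pre_ is exactly where the Python A returns: grid nonempty with a nonempty first row
-- (else IndexError on grid[0] / the column-0 writes) and every row at least as long as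
-- the first (A reads every cell grid[j][i] for i < len(grid[0]); shorter rows IndexError).
def Pre_minimum_path_sum_3ways (grid : List (List Int)) : Prop :=
  0 < (grid.getD 0 []).length ∧ ∀ r ∈ grid, (grid.getD 0 []).length ≤ r.length
instance (grid : List (List Int)) : Decidable (Pre_minimum_path_sum_3ways grid) := by
  unfold Pre_minimum_path_sum_3ways; infer_instance

def pvWitness_minimum_path_sum_3ways : List (List Int) := [[1, 2], [3, 4]]

def Spec_minimum_path_sum_3ways (grid : List (List Int)) (out : Int) : Prop :=
  out = minimum_path_sum_3ways_alt grid
instance (grid : List (List Int)) (out : Int) : Decidable (Spec_minimum_path_sum_3ways grid out) := by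
  unfold Spec_minimum_path_sum_3ways; infer_instance

-- ===== CLAIM (what is proved, stated in full; the proofs are below) =====
def Claim_equal_minimum_path_sum_3ways : Prop :=
  ∀ (grid : List (List Int)), Dom_minimum_path_sum_3ways grid →
    Pre_minimum_path_sum_3ways grid →
    Spec_minimum_path_sum_3ways grid (minimum_path_sum_3ways grid)

-- ===== LEMMAS AND PROOFS =====

lemma pvSeg_eq_sum (f : Nat → Int) (a b : Nat) :
    pvSeg f a b = ((List.range' a (b + 1 - a)).map f).sum := by
  simp [pvSeg, PySem.List.foldl_add]

lemma pvSeg_self (f : Nat → Int) (a : Nat) : pvSeg f a a = f a := by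
  rw [pvSeg_eq_sum, show a + 1 - a = 1 by omega]
  simp

lemma pvSeg_succ_right (f : Nat → Int) {a b : Nat} (h : a ≤ b + 1) :
    pvSeg f a (b + 1) = pvSeg f a b + f (b + 1) := by
  rw [pvSeg_eq_sum, pvSeg_eq_sum, show b + 1 + 1 - a = (b + 1 - a) + 1 by omega,
    List.range'_concat, show a + 1 * (b + 1 - a) = b + 1 by omega]
  simp

lemma pvSeg_cons (f : Nat → Int) {a b : Nat} (h : a ≤ b) :
    pvSeg f a b = f a + pvSeg f (a + 1) b := by
  rw [pvSeg_eq_sum, pvSeg_eq_sum, show b + 1 - a = (b - a) + 1 by omega, List.range'_succ]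
  simp [show b + 1 - (a + 1) = b - a by omega]

lemma min?_eq_of_mem_of_le (l : List Int) (v : Int) (hv : v ∈ l) (hle : ∀ x ∈ l, v ≤ x) :
    PySem.List.min? l (fun x => x) = some v := by
  cases h : PySem.List.min? l (fun x => x) with
  | none =>
      rw [PySem.List.min?_eq_none_iff] at h
      subst h; simp at hv
  | some m =>
      have h1 := PySem.List.min?_mem h
      have h2 := PySem.List.min?_isMin h v hv
      have h3 := hle m h1
      have : m = v := le_antisymm h2 h3
      rw [this]

lemma pvD_le (p g : Nat → Int) : ∀ j j2, j2 ≤ j → pvD p g j ≤ p j2 + pvSeg g j2 j := by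
  intro j
  induction j with
  | zero =>
      intro j2 h2
      have : j2 = 0 := by omega
      subst this
      simp [pvD, pvSeg_self]
  | succ j ih =>
      intro j2 h2
      rcases Nat.lt_or_ge j2 (j + 1) with hlt | hge
      · have ihb := ih j2 (by omega)
        rw [pvSeg_succ_right g (by omega : j2 ≤ j + 1)]
        have hm := min_le_right (p (j + 1)) (pvD p g j)
        show min (p (j + 1)) (pvD p g j) + g (j + 1) ≤ _
        omega
      · have : j2 = j + 1 := by omega
        subst this
        rw [pvSeg_self]
        have hm := min_le_left (p (j + 1)) (pvD p g j)
        show min (p (j + 1)) (pvD p g j) + g (j + 1) ≤ _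
        omega

lemma pvD_attain (p g : Nat → Int) : ∀ j, ∃ j2, j2 ≤ j ∧ pvD p g j = p j2 + pvSeg g j2 j := by
  intro j
  induction j with
  | zero => exact ⟨0, le_refl 0, by simp [pvD, pvSeg_self]⟩
  | succ j ih =>
      rcases min_choice (p (j + 1)) (pvD p g j) with hc | hc
      · refine ⟨j + 1, le_refl _, ?_⟩
        rw [pvSeg_self]
        show min (p (j + 1)) (pvD p g j) + g (j + 1) = _
        rw [hc]
      · obtain ⟨j2, hle, he⟩ := ih
        refine ⟨j2, by omega, ?_⟩
        rw [pvSeg_succ_right g (by omega : j2 ≤ j + 1)]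
        show min (p (j + 1)) (pvD p g j) + g (j + 1) = _
        rw [hc, he]; ring

lemma pvE_le (p q : Nat → Int) : ∀ k j2, j2 ≤ k → pvE p q k ≤ p j2 + pvSeg q (j2 + 1) (k + 1) := by
  intro k
  induction k with
  | zero =>
      intro j2 h2
      have : j2 = 0 := by omega
      subst this
      simp [pvE, pvSeg_self]
  | succ k ih =>
      intro j2 h2
      rw [show k + 1 + 1 = k + 2 by omega]
      rcases Nat.lt_or_ge j2 (k + 1) with hlt | hge
      · have ihb := ih j2 (by omega)
        rw [pvSeg_succ_right q (by omega : j2 + 1 ≤ k + 2), show k + 1 + 1 = k + 2 by omega]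
        have hm := min_le_left (pvE p q k) (p (k + 1))
        show min (pvE p q k) (p (k + 1)) + q (k + 2) ≤ _
        omega
      · have : j2 = k + 1 := by omega
        subst this
        rw [show k + 1 + 1 = k + 2 by omega, pvSeg_self]
        have hm := min_le_right (pvE p q k) (p (k + 1))
        show min (pvE p q k) (p (k + 1)) + q (k + 2) ≤ _
        omega

lemma pvE_attain (p q : Nat → Int) :
    ∀ k, ∃ j2, j2 ≤ k ∧ pvE p q k = p j2 + pvSeg q (j2 + 1) (k + 1) := by
  intro k
  induction k with
  | zero => exact ⟨0, le_refl 0, by simp [pvE, pvSeg_self]⟩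
  | succ k ih =>
      rcases min_choice (pvE p q k) (p (k + 1)) with hc | hc
      · obtain ⟨j2, hle, he⟩ := ih
        refine ⟨j2, by omega, ?_⟩
        rw [pvSeg_succ_right q (by omega : j2 + 1 ≤ k + 2)]
        show min (pvE p q k) (p (k + 1)) + q (k + 2) = _
        rw [hc, he]; ring
      · refine ⟨k + 1, le_refl _, ?_⟩
        rw [pvSeg_self]
        show min (pvE p q k) (p (k + 1)) + q (k + 2) = _
        rw [hc]

lemma pvU_le (p g : Nat → Int) (t : Nat) :
    ∀ k, k ≤ t → ∀ j2, t - k ≤ j2 → j2 ≤ t → pvU p g t k ≤ p j2 + pvSeg g (t - k) j2 := by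
  intro k
  induction k with
  | zero =>
      intro _ j2 h1 h2
      have : j2 = t := by omega
      subst this
      simp [pvU, pvSeg_self]
  | succ k ih =>
      intro hk j2 h1 h2
      show min (p (t - (k + 1))) (pvU p g t k) + g (t - (k + 1)) ≤ _
      rcases Nat.eq_or_lt_of_le h1 with heq | hlt
      · rw [← heq, pvSeg_self]
        have hm := min_le_left (p (t - (k + 1))) (pvU p g t k)
        omega
      · have hcons := pvSeg_cons g (show t - (k + 1) ≤ j2 by omega)
        rw [show t - (k + 1) + 1 = t - k by omega] at hcons
        have ihb := ih (by omega) j2 (by omega) h2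
        have hm := min_le_right (p (t - (k + 1))) (pvU p g t k)
        omega

lemma pvU_attain (p g : Nat → Int) (t : Nat) :
    ∀ k, k ≤ t → ∃ j2, t - k ≤ j2 ∧ j2 ≤ t ∧ pvU p g t k = p j2 + pvSeg g (t - k) j2 := by
  intro k
  induction k with
  | zero => exact fun _ => ⟨t, by omega, le_refl t, by simp [pvU, pvSeg_self]⟩
  | succ k ih =>
      intro hk
      rcases min_choice (p (t - (k + 1))) (pvU p g t k) with hc | hc
      · refine ⟨t - (k + 1), le_refl _, by omega, ?_⟩
        rw [pvSeg_self]
        show min (p (t - (k + 1))) (pvU p g t k) + g (t - (k + 1)) = _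
        rw [hc]
      · obtain ⟨j2, hge, hle, he⟩ := ih (by omega)
        refine ⟨j2, by omega, hle, ?_⟩
        have hcons := pvSeg_cons g (show t - (k + 1) ≤ j2 by omega)
        rw [show t - (k + 1) + 1 = t - k by omega] at hcons
        show min (p (t - (k + 1))) (pvU p g t k) + g (t - (k + 1)) = _
        rw [hc, he]; omega

lemma pvF_le (p q : Nat → Int) (t2 : Nat) :
    ∀ k, k ≤ t2 → ∀ j2, t2 - k + 1 ≤ j2 → j2 ≤ t2 + 1 →
      pvF p q t2 k ≤ p j2 + pvSeg q (t2 - k) (j2 - 1) := by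
  intro k
  induction k with
  | zero =>
      intro _ j2 h1 h2
      have : j2 = t2 + 1 := by omega
      subst this
      simp [pvF, pvSeg_self]
  | succ k ih =>
      intro hk j2 h1 h2
      show min (p (t2 - k)) (pvF p q t2 k) + q (t2 - (k + 1)) ≤ _
      rcases Nat.eq_or_lt_of_le h1 with heq | hlt
      · rw [← heq, show t2 - (k + 1) + 1 - 1 = t2 - (k + 1) by omega, pvSeg_self]
        have hm := min_le_left (p (t2 - k)) (pvF p q t2 k)
        rw [show t2 - (k + 1) + 1 = t2 - k by omega]
        omega
      · have hcons := pvSeg_cons q (show t2 - (k + 1) ≤ j2 - 1 by omega)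
        rw [show t2 - (k + 1) + 1 = t2 - k by omega] at hcons
        have ihb := ih (by omega) j2 (by omega) h2
        have hm := min_le_right (p (t2 - k)) (pvF p q t2 k)
        omega

lemma pvF_attain (p q : Nat → Int) (t2 : Nat) :
    ∀ k, k ≤ t2 → ∃ j2, t2 - k + 1 ≤ j2 ∧ j2 ≤ t2 + 1 ∧
      pvF p q t2 k = p j2 + pvSeg q (t2 - k) (j2 - 1) := by
  intro k
  induction k with
  | zero =>
      exact fun _ => ⟨t2 + 1, by omega, le_refl _,
        by simp [pvF, pvSeg_self]⟩
  | succ k ih =>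
      intro hk
      rcases min_choice (p (t2 - k)) (pvF p q t2 k) with hc | hc
      · refine ⟨t2 - (k + 1) + 1, le_refl _, by omega, ?_⟩
        rw [show t2 - (k + 1) + 1 - 1 = t2 - (k + 1) by omega, pvSeg_self]
        show min (p (t2 - k)) (pvF p q t2 k) + q (t2 - (k + 1)) = _
        rw [hc, show t2 - (k + 1) + 1 = t2 - k by omega]
      · obtain ⟨j2, hge, hle, he⟩ := ih (by omega)
        refine ⟨j2, by omega, hle, ?_⟩
        have hcons := pvSeg_cons q (show t2 - (k + 1) ≤ j2 - 1 by omega)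
        rw [show t2 - (k + 1) + 1 = t2 - k by omega] at hcons
        show min (p (t2 - k)) (pvF p q t2 k) + q (t2 - (k + 1)) = _
        rw [hc, he]; omega

lemma mem_pvDists (p gc qc : Nat → Int) (h j1 : Nat) (hj : j1 < h) (x : Int) :
    x ∈ pvDists p gc qc h j1 ↔
      (∃ j2, j2 < j1 ∧ (x = p j2 + pvSeg gc j2 j1 ∨ x = p j2 + pvSeg qc (j2 + 1) j1 + gc j1)) ∨
      x = p j1 + gc j1 ∨
      (∃ j2, j1 < j2 ∧ j2 < h ∧
        (x = p j2 + pvSeg gc j1 j2 ∨ x = p j2 + pvSeg qc j1 (j2 - 1) + gc j1)) := by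
  unfold pvDists
  rw [PySem.List.foldl_append_eq_flatMap, PySem.List.foldl_append_eq_flatMap]
  simp only [List.nil_append, List.mem_append, List.mem_flatMap, List.mem_range,
    List.mem_range'_1, List.mem_cons, List.not_mem_nil, or_false]
  constructor
  · rintro ((⟨j2, hj2, hx⟩ | hx) | ⟨j2, ⟨ha, hb⟩, hx⟩)
    · exact Or.inl ⟨j2, hj2, hx⟩
    · exact Or.inr (Or.inl hx)
    · exact Or.inr (Or.inr ⟨j2, by omega, by omega, hx⟩)
  · rintro (⟨j2, hj2, hx⟩ | hx | ⟨j2, ha, hb, hx⟩)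
    · exact Or.inl (Or.inl ⟨j2, hj2, hx⟩)
    · exact Or.inl (Or.inr hx)
    · exact Or.inr ⟨j2, ⟨by omega, by omega⟩, hx⟩

lemma pvRow_le_D (p gc qc : Nat → Int) (h j : Nat) : pvRow p gc qc h j ≤ pvD p gc j := by
  simp only [pvRow]
  split_ifs <;> simp

lemma pvRow_le_U (p gc qc : Nat → Int) (h j : Nat) :
    pvRow p gc qc h j ≤ pvU p gc (h - 1) (h - 1 - j) := by
  simp only [pvRow]
  split_ifs <;> simp

lemma pvRow_le_E (p gc qc : Nat → Int) (h j : Nat) (hj : 0 < j) :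
    pvRow p gc qc h j ≤ pvE p qc (j - 1) + gc j := by
  simp only [pvRow]
  split_ifs <;> simp_all

lemma pvRow_le_F (p gc qc : Nat → Int) (h j : Nat) (hj : j + 1 < h) :
    pvRow p gc qc h j ≤ pvF p qc (h - 2) (h - 2 - j) + gc j := by
  simp only [pvRow]
  split_ifs <;> simp_all

lemma pvRow_eq_cases (p gc qc : Nat → Int) (h j : Nat) :
    pvRow p gc qc h j = pvD p gc j ∨
    pvRow p gc qc h j = pvU p gc (h - 1) (h - 1 - j) ∨
    (0 < j ∧ pvRow p gc qc h j = pvE p qc (j - 1) + gc j) ∨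
    (j + 1 < h ∧ pvRow p gc qc h j = pvF p qc (h - 2) (h - 2 - j) + gc j) := by
  by_cases h2 : 0 < j <;> by_cases h1 : j + 1 < h
  · rw [show pvRow p gc qc h j = min (min (min (pvD p gc j) (pvU p gc (h - 1) (h - 1 - j)))
        (pvE p qc (j - 1) + gc j)) (pvF p qc (h - 2) (h - 2 - j) + gc j) from by
      simp [pvRow, h1, h2]]
    rcases min_choice (min (min (pvD p gc j) (pvU p gc (h - 1) (h - 1 - j)))
        (pvE p qc (j - 1) + gc j)) (pvF p qc (h - 2) (h - 2 - j) + gc j) with hc | hc <;> rw [hc]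
    · rcases min_choice (min (pvD p gc j) (pvU p gc (h - 1) (h - 1 - j)))
          (pvE p qc (j - 1) + gc j) with hd | hd <;> rw [hd]
      · rcases min_choice (pvD p gc j) (pvU p gc (h - 1) (h - 1 - j)) with he | he <;> rw [he]
        · exact Or.inl rfl
        · exact Or.inr (Or.inl rfl)
      · exact Or.inr (Or.inr (Or.inl ⟨h2, rfl⟩))
    · exact Or.inr (Or.inr (Or.inr ⟨h1, rfl⟩))
  · rw [show pvRow p gc qc h j = min (min (pvD p gc j) (pvU p gc (h - 1) (h - 1 - j)))
        (pvE p qc (j - 1) + gc j) from by simp [pvRow, h1, h2]]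
    rcases min_choice (min (pvD p gc j) (pvU p gc (h - 1) (h - 1 - j)))
        (pvE p qc (j - 1) + gc j) with hc | hc <;> rw [hc]
    · rcases min_choice (pvD p gc j) (pvU p gc (h - 1) (h - 1 - j)) with he | he <;> rw [he]
      · exact Or.inl rfl
      · exact Or.inr (Or.inl rfl)
    · exact Or.inr (Or.inr (Or.inl ⟨h2, rfl⟩))
  · rw [show pvRow p gc qc h j = min (min (pvD p gc j) (pvU p gc (h - 1) (h - 1 - j)))
        (pvF p qc (h - 2) (h - 2 - j) + gc j) from by simp [pvRow, h1, h2]]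
    rcases min_choice (min (pvD p gc j) (pvU p gc (h - 1) (h - 1 - j)))
        (pvF p qc (h - 2) (h - 2 - j) + gc j) with hc | hc <;> rw [hc]
    · rcases min_choice (pvD p gc j) (pvU p gc (h - 1) (h - 1 - j)) with he | he <;> rw [he]
      · exact Or.inl rfl
      · exact Or.inr (Or.inl rfl)
    · exact Or.inr (Or.inr (Or.inr ⟨h1, rfl⟩))
  · rw [show pvRow p gc qc h j = min (pvD p gc j) (pvU p gc (h - 1) (h - 1 - j)) from by
      simp [pvRow, h1, h2]]
    rcases min_choice (pvD p gc j) (pvU p gc (h - 1) (h - 1 - j)) with he | he <;> rw [he]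
    · exact Or.inl rfl
    · exact Or.inr (Or.inl rfl)

lemma pvRow_mem (p gc qc : Nat → Int) (h j1 : Nat) (hj : j1 < h) :
    pvRow p gc qc h j1 ∈ pvDists p gc qc h j1 := by
  rw [mem_pvDists p gc qc h j1 hj]
  rcases pvRow_eq_cases p gc qc h j1 with hc | hc | ⟨hj0, hc⟩ | ⟨hjh, hc⟩
  · obtain ⟨j2, hle, he⟩ := pvD_attain p gc j1
    rcases Nat.lt_or_eq_of_le hle with hlt | heq
    · exact Or.inl ⟨j2, hlt, Or.inl (by rw [hc, he])⟩
    · subst heq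
      rw [pvSeg_self] at he
      exact Or.inr (Or.inl (by rw [hc, he]))
  · obtain ⟨j2, hge, hle, he⟩ := pvU_attain p gc (h - 1) (h - 1 - j1) (by omega)
    rw [show h - 1 - (h - 1 - j1) = j1 by omega] at hge he
    rcases Nat.lt_or_eq_of_le hge with hlt | heq
    · exact Or.inr (Or.inr ⟨j2, hlt, by omega, Or.inl (by rw [hc, he])⟩)
    · subst heq
      rw [pvSeg_self] at he
      exact Or.inr (Or.inl (by rw [hc, he]))
  · obtain ⟨j2, hle, he⟩ := pvE_attain p qc (j1 - 1)
    rw [show j1 - 1 + 1 = j1 by omega] at he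
    exact Or.inl ⟨j2, by omega, Or.inr (by rw [hc, he])⟩
  · obtain ⟨j2, hge, hle, he⟩ := pvF_attain p qc (h - 2) (h - 2 - j1) (by omega)
    rw [show h - 2 - (h - 2 - j1) = j1 by omega] at hge he
    exact Or.inr (Or.inr ⟨j2, by omega, by omega, Or.inr (by rw [hc, he])⟩)

lemma pvRow_isMin (p gc qc : Nat → Int) (h j1 : Nat) (hj : j1 < h) :
    ∀ x ∈ pvDists p gc qc h j1, pvRow p gc qc h j1 ≤ x := by
  intro x hx
  rw [mem_pvDists p gc qc h j1 hj] at hx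
  rcases hx with ⟨j2, hj2, hx | hx⟩ | hx | ⟨j2, h12, h2h, hx | hx⟩
  · exact hx ▸ le_trans (pvRow_le_D p gc qc h j1) (pvD_le p gc j1 j2 (by omega))
  · have h0 : 0 < j1 := by omega
    have he := pvE_le p qc (j1 - 1) j2 (by omega)
    rw [show j1 - 1 + 1 = j1 by omega] at he
    have hr := pvRow_le_E p gc qc h j1 h0
    subst hx
    omega
  · have hd := pvD_le p gc j1 j1 (le_refl j1)
    rw [pvSeg_self] at hd
    exact hx ▸ le_trans (pvRow_le_D p gc qc h j1) hd
  · have hb := pvU_le p gc (h - 1) (h - 1 - j1) (by omega) j2 (by omega) (by omega)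
    rw [show h - 1 - (h - 1 - j1) = j1 by omega] at hb
    exact hx ▸ le_trans (pvRow_le_U p gc qc h j1) hb
  · have hh : j1 + 1 < h := by omega
    have hb := pvF_le p qc (h - 2) (h - 2 - j1) (by omega) j2 (by omega) (by omega)
    rw [show h - 2 - (h - 2 - j1) = j1 by omega] at hb
    have hr := pvRow_le_F p gc qc h j1 hh
    subst hx
    omega

lemma min?_pvDists (p gc qc : Nat → Int) (h j1 : Nat) (hj : j1 < h) :
    (PySem.List.min? (pvDists p gc qc h j1) (fun x => x)).getD 0 = pvRow p gc qc h j1 := by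
  rw [min?_eq_of_mem_of_le _ _ (pvRow_mem p gc qc h j1 hj) (pvRow_isMin p gc qc h j1 hj)]
  rfl

-- ----- state lemmas for A's 2-D sum_grid -----

lemma pvSet2_getD_row_ne (m : List (List Int)) (j i j' : Nat) (v : Int) (hne : j ≠ j') :
    (pvSet2 m j i v).getD j' [] = m.getD j' [] := by
  unfold pvSet2
  rw [List.getD_eq_getElem?_getD, List.getElem?_set_ne hne, ← List.getD_eq_getElem?_getD]

lemma pvSet2_getD_row_self (m : List (List Int)) (j i : Nat) (v : Int) (hj : j < m.length) :
    (pvSet2 m j i v).getD j [] = (m.getD j []).set i v := by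
  unfold pvSet2
  rw [List.getD_eq_getElem?_getD, List.getElem?_set_self hj]
  rfl

lemma pvGet2_set_ne (m : List (List Int)) (j i j' i' : Nat) (v : Int)
    (hne : j ≠ j' ∨ i ≠ i') : pvGet2 (pvSet2 m j i v) j' i' = pvGet2 m j' i' := by
  rcases hne with hne | hne
  · unfold pvGet2
    rw [pvSet2_getD_row_ne m j i j' v hne]
  · by_cases hj : j = j'
    · subst hj
      by_cases hl : j < m.length
      · unfold pvGet2
        rw [pvSet2_getD_row_self m j i v hl, List.getD_eq_getElem?_getD,
          List.getElem?_set_ne hne, ← List.getD_eq_getElem?_getD]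
      · unfold pvGet2 pvSet2
        rw [List.set_eq_of_length_le (by omega)]
    · unfold pvGet2
      rw [pvSet2_getD_row_ne m j i j' v hj]

lemma pvGet2_set_self (m : List (List Int)) (j i : Nat) (v : Int)
    (hj : j < m.length) (hi : i < (m.getD j []).length) :
    pvGet2 (pvSet2 m j i v) j i = v := by
  unfold pvGet2
  rw [pvSet2_getD_row_self m j i v hj, List.getD_eq_getElem?_getD,
    List.getElem?_set_self hi]
  rfl

lemma pvSet2_length (m : List (List Int)) (j i : Nat) (v : Int) :
    (pvSet2 m j i v).length = m.length := by
  simp [pvSet2]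

lemma pvSet2_rows (m : List (List Int)) (j i : Nat) (v : Int) (w : Nat)
    (hw : ∀ r ∈ m, r.length = w) : ∀ r ∈ pvSet2 m j i v, r.length = w := by
  intro r hr
  unfold pvSet2 at hr
  by_cases hj : j < m.length
  · rcases List.mem_or_eq_of_mem_set hr with hmem | heq
    · exact hw r hmem
    · subst heq
      rw [List.length_set, List.getD_eq_getElem m [] hj]
      exact hw _ (List.getElem_mem _)
  · rw [List.set_eq_of_length_le (by omega)] at hr
    exact hw r hr

lemma pvDists_congr (p p' gc qc : Nat → Int) (h j1 : Nat) (hj : j1 < h)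
    (hp : ∀ j2, j2 < h → p j2 = p' j2) :
    pvDists p gc qc h j1 = pvDists p' gc qc h j1 := by
  unfold pvDists
  have h1 : List.foldl (fun acc j2 =>
        acc ++ [p j2 + pvSeg gc j2 j1, p j2 + pvSeg qc (j2 + 1) j1 + gc j1]) [] (List.range j1) =
      List.foldl (fun acc j2 =>
        acc ++ [p' j2 + pvSeg gc j2 j1, p' j2 + pvSeg qc (j2 + 1) j1 + gc j1]) [] (List.range j1) :=
 by
    apply PySem.List.foldl_congr_mem
    intro acc x hx
    rw [hp x (by have := List.mem_range.mp hx; omega)]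
  have h2 : List.foldl (fun acc j2 =>
        acc ++ [p j2 + pvSeg gc j1 j2, p j2 + pvSeg qc j1 (j2 - 1) + gc j1]) []
        (List.range' (j1 + 1) (h - (j1 + 1))) =
      List.foldl (fun acc j2 =>
        acc ++ [p' j2 + pvSeg gc j1 j2, p' j2 + pvSeg qc j1 (j2 - 1) + gc j1]) []
        (List.range' (j1 + 1) (h - (j1 + 1))) :=
 by
    apply PySem.List.foldl_congr_mem
    intro acc x hx
    rw [hp x (by have := List.mem_range'_1.mp hx; omega)]
  rw [hp j1 hj, h1, h2]

-- ----- loop lemmas -----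

lemma innerLoop (grid : List (List Int)) (w ic : Nat) (hic : 1 ≤ ic) (hcw : ic < w)
    (prev : List Int) :
    ∀ (n k : Nat) (m : List (List Int)), k + n = grid.length →
      m.length = grid.length → (∀ r ∈ m, r.length = w) →
      (∀ j2, j2 < grid.length → pvGet2 m j2 (ic - 1) = prev.getD j2 0) →
      (∀ j, j < k → pvGet2 m j ic = pvRow (fun j2 => prev.getD j2 0)
        (fun j' => pvGet2 grid j' ic) (fun j' => pvGet2 grid j' (ic - 1)) grid.length j) →
      ((List.range' k n).foldl (fun m2 j1 =>
          pvSet2 m2 j1 ic ((PySem.List.min? (pvDists (fun j2 => pvGet2 m2 j2 (ic - 1))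
              (fun j' => pvGet2 grid j' ic) (fun j' => pvGet2 grid j' (ic - 1)) grid.length j1)
            (fun x => x)).getD 0)) m).length = grid.length ∧
      (∀ r ∈ (List.range' k n).foldl (fun m2 j1 =>
          pvSet2 m2 j1 ic ((PySem.List.min? (pvDists (fun j2 => pvGet2 m2 j2 (ic - 1))
              (fun j' => pvGet2 grid j' ic) (fun j' => pvGet2 grid j' (ic - 1)) grid.length j1)
            (fun x => x)).getD 0)) m, r.length = w) ∧
      (∀ j2, j2 < grid.length → pvGet2 ((List.range' k n).foldl (fun m2 j1 =>
          pvSet2 m2 j1 ic ((PySem.List.min? (pvDists (fun j2 => pvGet2 m2 j2 (ic - 1))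
              (fun j' => pvGet2 grid j' ic) (fun j' => pvGet2 grid j' (ic - 1)) grid.length j1)
            (fun x => x)).getD 0)) m) j2 (ic - 1) = prev.getD j2 0) ∧
      (∀ j, j < grid.length → pvGet2 ((List.range' k n).foldl (fun m2 j1 =>
          pvSet2 m2 j1 ic ((PySem.List.min? (pvDists (fun j2 => pvGet2 m2 j2 (ic - 1))
              (fun j' => pvGet2 grid j' ic) (fun j' => pvGet2 grid j' (ic - 1)) grid.length j1)
            (fun x => x)).getD 0)) m) j ic = pvRow (fun j2 => prev.getD j2 0)
        (fun j' => pvGet2 grid j' ic) (fun j' => pvGet2 grid j' (ic - 1)) grid.length j) := by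
  intro n
  induction n with
  | zero =>
      intro k m hkn hml hrows hprev hset
      simp only [List.range'_zero, List.foldl_nil]
      exact ⟨hml, hrows, hprev, fun j hj => hset j (by omega)⟩
  | succ n ih =>
      intro k m hkn hml hrows hprev hset
      rw [List.range'_succ, List.foldl_cons]
      have hk : k < grid.length := by omega
      have hrowlen : (m.getD k []).length = w := by
        rw [List.getD_eq_getElem m [] (by omega)]
        exact hrows _ (List.getElem_mem _)
      have hveq : ((PySem.List.min? (pvDists (fun j2 => pvGet2 m j2 (ic - 1))
          (fun j' => pvGet2 grid j' ic) (fun j' => pvGet2 grid j' (ic - 1)) grid.length k)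
          (fun x => x)).getD 0) = pvRow (fun j2 => prev.getD j2 0)
          (fun j' => pvGet2 grid j' ic) (fun j' => pvGet2 grid j' (ic - 1)) grid.length k := by
        rw [pvDists_congr (fun j2 => pvGet2 m j2 (ic - 1)) (fun j2 => prev.getD j2 0)
          _ _ grid.length k hk hprev]
        exact min?_pvDists _ _ _ grid.length k hk
      set v := ((PySem.List.min? (pvDists (fun j2 => pvGet2 m j2 (ic - 1))
          (fun j' => pvGet2 grid j' ic) (fun j' => pvGet2 grid j' (ic - 1)) grid.length k)
          (fun x => x)).getD 0) with hv
      apply ih (k + 1) (pvSet2 m k ic v) (by omega)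
      · rw [pvSet2_length]; exact hml
      · exact pvSet2_rows m k ic v w hrows
      · intro j2 hj2
        rw [pvGet2_set_ne m k ic j2 (ic - 1) v (Or.inr (by omega))]
        exact hprev j2 hj2
      · intro j hj
        rcases Nat.lt_or_eq_of_le (Nat.lt_succ_iff.mp hj) with hlt | heq
        · rw [pvGet2_set_ne m k ic j ic v (Or.inl (by omega))]
          exact hset j hlt
        · subst heq
          rw [pvGet2_set_self m j ic v (by omega) (by omega)]
          exact hveq

lemma initLoop (grid : List (List Int)) (w : Nat) (hw : 0 < w) :
    ∀ (n k : Nat) (m : List (List Int)), k + n = grid.length →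
      m.length = grid.length → (∀ r ∈ m, r.length = w) →
      (∀ j, j < k → pvGet2 m j 0 = pvGet2 grid j 0) →
      ((List.range' k n).foldl (fun m j => pvSet2 m j 0 (pvGet2 grid j 0)) m).length = grid.length ∧
      (∀ r ∈ (List.range' k n).foldl (fun m j => pvSet2 m j 0 (pvGet2 grid j 0)) m, r.length = w) ∧
      (∀ j, j < grid.length →
        pvGet2 ((List.range' k n).foldl (fun m j => pvSet2 m j 0 (pvGet2 grid j 0)) m) j 0 =
          pvGet2 grid j 0) := by
  intro n
  induction n with
  | zero =>
      intro k m hkn hml hrows hset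
      simp only [List.range'_zero, List.foldl_nil]
      exact ⟨hml, hrows, fun j hj => hset j (by omega)⟩
  | succ n ih =>
      intro k m hkn hml hrows hset
      rw [List.range'_succ, List.foldl_cons]
      have hk : k < grid.length := by omega
      have hrowlen : (m.getD k []).length = w := by
        rw [List.getD_eq_getElem m [] (by omega)]
        exact hrows _ (List.getElem_mem _)
      apply ih (k + 1) _ (by omega)
      · rw [pvSet2_length]; exact hml
      · exact pvSet2_rows m k 0 _ w hrows
      · intro j hj
        rcases Nat.lt_or_eq_of_le (Nat.lt_succ_iff.mp hj) with hlt | heq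
        · rw [pvGet2_set_ne m k 0 j 0 _ (Or.inl (by omega))]
          exact hset j hlt
        · subst heq
          rw [pvGet2_set_self m j 0 _ (by omega) (by omega)]

lemma outerLoop (grid : List (List Int)) (w : Nat) :
    ∀ (n i : Nat) (m : List (List Int)) (prev : List Int),
      1 ≤ i → i + n = w →
      m.length = grid.length → (∀ r ∈ m, r.length = w) →
      (∀ j, j < grid.length → pvGet2 m j (i - 1) = prev.getD j 0) →
      prev.length = grid.length →
      (((List.range' i n).foldl (fun m i' =>
          (List.range' 0 grid.length).foldl (fun m2 j1 =>
            pvSet2 m2 j1 i' ((PySem.List.min? (pvDists (fun j2 => pvGet2 m2 j2 (i' - 1))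
                (fun j' => pvGet2 grid j' i') (fun j' => pvGet2 grid j' (i' - 1)) grid.length j1)
              (fun x => x)).getD 0)) m) m).length = grid.length ∧
      (∀ r ∈ (List.range' i n).foldl (fun m i' =>
          (List.range' 0 grid.length).foldl (fun m2 j1 =>
            pvSet2 m2 j1 i' ((PySem.List.min? (pvDists (fun j2 => pvGet2 m2 j2 (i' - 1))
                (fun j' => pvGet2 grid j' i') (fun j' => pvGet2 grid j' (i' - 1)) grid.length j1)
              (fun x => x)).getD 0)) m) m, r.length = w) ∧
      (∀ j, j < grid.length → pvGet2 ((List.range' i n).foldl (fun m i' =>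
          (List.range' 0 grid.length).foldl (fun m2 j1 =>
            pvSet2 m2 j1 i' ((PySem.List.min? (pvDists (fun j2 => pvGet2 m2 j2 (i' - 1))
                (fun j' => pvGet2 grid j' i') (fun j' => pvGet2 grid j' (i' - 1)) grid.length j1)
              (fun x => x)).getD 0)) m) m) j (w - 1) =
        ((List.range' i n).foldl (fun prev i' => pvCol grid prev i') prev).getD j 0) ∧
      ((List.range' i n).foldl (fun prev i' => pvCol grid prev i') prev).length = grid.length) := by
  intro n
  induction n with
  | zero =>
      intro i m prev hi1 hin hml hrows hprev hplen
      simp only [List.range'_zero, List.foldl_nil]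
      refine ⟨hml, hrows, ?_, hplen⟩
      intro j hj
      rw [show w - 1 = i - 1 by omega]
      exact hprev j hj
  | succ n ih =>
      intro i m prev hi1 hin hml hrows hprev hplen
      rw [List.range'_succ, List.foldl_cons, List.foldl_cons]
      have hinner := innerLoop grid w i hi1 (by omega) prev grid.length 0 m
        (by omega) hml hrows hprev (by intro j hj; omega)
      obtain ⟨hl2, hr2, _, hcol⟩ := hinner
      apply ih (i + 1) _ (pvCol grid prev i) (by omega) (by omega) hl2 hr2
      · intro j hj
        rw [show i + 1 - 1 = i by omega]
        rw [hcol j hj]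
        unfold pvCol
        rw [PySem.List.getD_map_range _ _ _ _ hj]
      · simp [pvCol]

lemma pyGet_neg_one (l : List Int) (hl : 0 < l.length) :
    (PySem.List.pyGet? l (-1)).getD 0 = l.getD (l.length - 1) 0 := by
  have h1 : ¬ (0:Int) ≤ -1 := by norm_num
  have h2 : -(l.length : Int) ≤ -1 := by omega
  simp only [PySem.List.pyGet?, PySem.List.pyIdx?, h1, h2, if_false, if_true, neg_neg,
    Int.toNat_one, List.getD_eq_getElem?_getD]
  rfl

lemma getD_map_head (grid : List (List Int)) (j : Nat) (hj : j < grid.length) :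
    (grid.map (fun row => row.getD 0 0)).getD j 0 = pvGet2 grid j 0 := by
  unfold pvGet2
  rw [List.getD_eq_getElem?_getD, List.getElem?_map, List.getElem?_eq_getElem hj]
  simp only [Option.map_some, Option.getD_some]
  rw [List.getD_eq_getElem grid [] hj]

lemma finalStep (w : Nat) (hw : 0 < w) (len : Nat) (M : List (List Int)) (P : List Int)
    (hlF : M.length = len) (hrF : ∀ r ∈ M, r.length = w)
    (hgF : ∀ j, j < len → pvGet2 M j (w - 1) = P.getD j 0) (hpF : P.length = len) :
    (PySem.List.min? ((List.range' 0 len).map (fun j =>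
        (PySem.List.pyGet? (M.getD j []) (-1)).getD 0)) (fun x => x)).getD 0 =
      (PySem.List.min? P (fun x => x)).getD 0 := by
  have hL : (List.range' 0 len).map (fun j => (PySem.List.pyGet? (M.getD j []) (-1)).getD 0) = P := by
    apply List.ext_getElem
    · simp [hpF]
    · intro j h1 h2
      have hj : j < len := by
        rw [hpF] at h2
        exact h2
      simp only [List.getElem_map, List.getElem_range', Nat.zero_add, Nat.one_mul]
      have hrow : (M.getD j []).length = w := by
        rw [List.getD_eq_getElem M [] (by omega)]
        exact hrF _ (List.getElem_mem _)
      rw [pyGet_neg_one _ (by omega), hrow]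
      have hg := hgF j hj
      unfold pvGet2 at hg
      rw [hg, List.getD_eq_getElem P 0 (by omega)]
  rw [hL]

-- ===== VERDICT (by name: the statement is the Claim_ definition above) =====
theorem minimum_path_sum_3ways_spec : Claim_equal_minimum_path_sum_3ways := by
  intro grid _ hpre
  obtain ⟨hw0, hrows⟩ := hpre
  have hh : 0 < grid.length := by
    cases grid with
    | nil => simp at hw0
    | cons a t => simp
  unfold Spec_minimum_path_sum_3ways minimum_path_sum_3ways minimum_path_sum_3ways_alt
  simp only [List.range_eq_range']
  obtain ⟨hl1, hr1, hg1⟩ := initLoop grid (grid.getD 0 []).length hw0 grid.length 0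
    ((List.range' 0 grid.length).map (fun _ => List.replicate (grid.getD 0 []).length 0))
    (by omega) (by simp)
    (by
      intro r hr
      simp only [List.mem_map] at hr
      obtain ⟨a, -, rfl⟩ := hr
      simp)
    (by intro j hj; exact absurd hj (by omega))
  obtain ⟨hlF, hrF, hgF, hpF⟩ := outerLoop grid (grid.getD 0 []).length
    ((grid.getD 0 []).length - 1) 1 _ (grid.map (fun row => row.getD 0 0)) le_rfl (by omega)
    hl1 hr1
    (by
      intro j hj
      rw [Nat.sub_self, hg1 j hj]
      exact (getD_map_head grid j hj).symm)
    (by simp)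
  exact finalStep (grid.getD 0 []).length hw0 grid.length _ _ hlF hrF hgF hpF
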